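-- pv_equiv track=rewrite | github.com/hooneyskywalker0127/coding-test-practice | 프로그래머스/0/181926. 수 조작하기 1/수 조작하기 1.py | solution
-- ===== SOURCE A (Python) =====
-- def solution(n, control):
--     for a in control:
--         if a == 'w':
--             n += 1
--         elif a == 's':
--             n -= 1
--         elif a == 'd':
--             n += 10
--         elif a == 'a':
--             n -= 10
--
--     return n
-- ===== SOURCE B (Python) =====
-- def solution(n, control):
--     # tally-then-combine: no per-character branching
--     return (n + control.count('w') - control.count('s')
--               + 10 * control.count('d') - 10 * control.count('a'))
-- ===== Notes on version B (the rewrite author's own statement) =====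
-- stated objective: simpler
-- what changed: Replaces the branching per-character accumulation loop with a closed-form arithmetic combination of four str.count tallies (unknown characters are ignored in both).
import Mathlib
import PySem

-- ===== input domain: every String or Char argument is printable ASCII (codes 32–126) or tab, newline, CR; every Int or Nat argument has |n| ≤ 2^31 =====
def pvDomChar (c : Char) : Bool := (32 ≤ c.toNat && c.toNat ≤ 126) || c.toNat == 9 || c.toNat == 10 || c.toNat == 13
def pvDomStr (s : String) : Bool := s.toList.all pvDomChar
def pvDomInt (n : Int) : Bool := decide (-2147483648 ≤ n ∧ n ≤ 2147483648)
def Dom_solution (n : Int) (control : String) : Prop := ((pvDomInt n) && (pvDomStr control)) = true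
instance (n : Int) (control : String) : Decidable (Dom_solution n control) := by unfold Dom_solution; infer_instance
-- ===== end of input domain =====

-- B replaces A's branching per-character loop with a closed-form combination of four tallies (simpler).

-- ===== PORT A =====
-- for a in control: if/elif chain updating n
def solution (n : Int) (control : String) : Int :=
  control.toList.foldl
    (fun n a =>
      if a == 'w' then n + 1
      else if a == 's' then n - 1
      else if a == 'd' then n + 10
      else if a == 'a' then n - 10
      else n) n

-- ===== PORT B =====
-- n + control.count('w') - control.count('s') + 10*control.count('d') - 10*control.count('a')
def solution_alt (n : Int) (control : String) : Int :=
  n + (PySem.Str.count control "w" : Int) - (PySem.Str.count control "s" : Int)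
    + 10 * (PySem.Str.count control "d" : Int) - 10 * (PySem.Str.count control "a" : Int)

-- ===== PRECONDITION & SPEC =====
def Spec_solution (n : Int) (control : String) (out : Int) : Prop := out = solution_alt n control
instance (n : Int) (control : String) (out : Int) : Decidable (Spec_solution n control out) := by unfold Spec_solution; infer_instance

-- ===== CLAIM (what is proved, stated in full; the proofs are below) =====
def Claim_equal_solution : Prop := ∀ (n : Int) (control : String), Dom_solution n control → Spec_solution n control (solution n control)

-- ===== LEMMAS AND PROOFS =====

-- fueled substring-count worker on a single-character pattern counts occurrences of that character
theorem pv_go_count (c : Char) (l : List Char) (fuel acc : Nat) (h : l.length ≤ fuel) :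
    PySem.Chars.count.go [c] fuel l acc = acc + l.count c := by
  induction l generalizing fuel acc with
  | nil => cases fuel <;> simp [PySem.Chars.count.go]
  | cons hd t ih =>
    cases fuel with
    | zero => simp at h
    | succ f =>
      simp at h
      rw [PySem.Chars.count.go]
      by_cases hc : hd = c <;> simp [List.isPrefixOf, hc, ih f _ h]
      · omega
      · exact fun e => hc e.symm

-- Python str.count of a single character equals List.count on the character list
theorem pv_str_count_char (s : String) (c : Char) :
    PySem.Str.count s (String.ofList [c]) = s.toList.count c := by
  have h := pv_go_count c s.toList s.toList.length 0 (le_refl _)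
  simp [PySem.Str.count_eq, PySem.Chars.count] at h ⊢
  simpa using h

-- A's loop, started at n, adds the signed tally of the four command characters
theorem pv_foldl_tally (l : List Char) (n : Int) :
    l.foldl
      (fun n a =>
        if a == 'w' then n + 1
        else if a == 's' then n - 1
        else if a == 'd' then n + 10
        else if a == 'a' then n - 10
        else n) n
    = n + (l.count 'w' : Int) - (l.count 's' : Int)
        + 10 * (l.count 'd' : Int) - 10 * (l.count 'a' : Int) := by
  induction l generalizing n with
  | nil => simp
  | cons hd t ih =>
    simp only [List.foldl_cons, ih, List.count_cons]
    by_cases h1 : hd = 'w' <;> by_cases h2 : hd = 's' <;> by_cases h3 : hd = 'd' <;>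
      by_cases h4 : hd = 'a' <;> simp_all <;> ring

-- ===== VERDICT (by name: the statement is the Claim_ definition above) =====
theorem solution_spec : Claim_equal_solution := by
  intro n control _
  unfold Spec_solution solution solution_alt
  rw [pv_foldl_tally]
  have hw := pv_str_count_char control 'w'
  have hs := pv_str_count_char control 's'
  have hd := pv_str_count_char control 'd'
  have ha := pv_str_count_char control 'a'
  simp only [show ("w" : String) = String.ofList ['w'] from rfl,
    show ("s" : String) = String.ofList ['s'] from rfl,
    show ("d" : String) = String.ofList ['d'] from rfl,
    show ("a" : String) = String.ofList ['a'] from rfl, hw, hs, hd, ha]
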